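-- pv_equiv track=rewrite | github.com/refactory-lang/ai-coding-lang-bench | generated/minigit-python-mypy-10-v2/minigit.py | parse_commit
-- ===== SOURCE A (Python) =====
-- def parse_commit(content: str) -> tuple[str, str, str, list[tuple[str, str]]]:
--     """Parse commit content into (parent, timestamp, message, files)."""
--     parent: str = ""
--     timestamp: str = ""
--     message: str = ""
--     files: list[tuple[str, str]] = []
--     in_files: bool = False
--
--     for line in content.split("\n"):
--         if in_files:
--             stripped: str = line.strip()
--             if stripped:
--                 parts: list[str] = stripped.split(" ", 1)
--                 if len(parts) == 2:
--                     files.append((parts[0], parts[1]))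
--         elif line.startswith("parent: "):
--             parent = line[len("parent: "):]
--         elif line.startswith("timestamp: "):
--             timestamp = line[len("timestamp: "):]
--         elif line.startswith("message: "):
--             message = line[len("message: "):]
--         elif line == "files:":
--             in_files = True
--
--     return parent, timestamp, message, files
-- ===== SOURCE B (Python) =====
-- def parse_commit(content: str) -> tuple[str, str, str, list[tuple[str, str]]]:
--     """Parse commit content into (parent, timestamp, message, files).
--
--     Split-index decomposition: find the first 'files:' line, read each header
--     field as the last match before it, and collect files from the lines after it.
--     """
--     lines = content.split("\n")
--     try:
--         cut = lines.index("files:")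
--     except ValueError:
--         cut = len(lines)
--     header = lines[:cut]
--
--     def last_with(prefix: str) -> str:
--         for line in reversed(header):
--             if line.startswith(prefix):
--                 return line[len(prefix):]
--         return ""
--
--     files: list[tuple[str, str]] = []
--     for line in lines[cut + 1:]:
--         parts = line.strip().split(" ", 1)
--         if len(parts) == 2:
--             files.append((parts[0], parts[1]))
--
--     return last_with("parent: "), last_with("timestamp: "), last_with("message: "), files
-- ===== Notes on version B (the rewrite author's own statement) =====
-- stated objective: alternative
-- what changed: Replaces A's single stateful pass (an in_files flag threaded through one loop) by a split-index decomposition: locate the first 'files:' line, read each header field as the last matching line before it (scanning backwards), and collect files in a separate pass over the lines after it.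
import Mathlib
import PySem

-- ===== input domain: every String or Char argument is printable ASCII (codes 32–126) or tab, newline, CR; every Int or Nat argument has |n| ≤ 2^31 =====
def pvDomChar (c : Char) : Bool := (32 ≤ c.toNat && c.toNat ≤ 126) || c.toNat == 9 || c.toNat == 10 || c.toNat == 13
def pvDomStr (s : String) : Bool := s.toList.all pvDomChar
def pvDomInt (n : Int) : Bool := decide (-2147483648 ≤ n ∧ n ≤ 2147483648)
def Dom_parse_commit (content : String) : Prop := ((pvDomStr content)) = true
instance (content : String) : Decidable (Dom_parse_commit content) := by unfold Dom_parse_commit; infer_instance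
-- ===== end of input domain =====

-- B replaces A's one stateful flag-driven pass by a split-index decomposition (find the first
-- 'files:' line, backward header scan, separate files pass); alternative structure, same cost.

-- ===== PORT A =====
def pcStepA (st : String × String × String × List (String × String) × Bool) (line : String) :
    String × String × String × List (String × String) × Bool :=
  match st with
  | (parent, timestamp, message, files, in_files) =>
    if in_files then
      let stripped := PySem.Str.strip line
      if stripped = "" then (parent, timestamp, message, files, true)
      else
        match (PySem.Str.splitMax? stripped " " 1).getD [] with
        | [a, b] => (parent, timestamp, message, files ++ [(a, b)], true)
        | _ => (parent, timestamp, message, files, true)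
    else if PySem.Str.startswith line "parent: " then
      (PySem.Str.slice line (some (PySem.Str.len "parent: ")) none, timestamp, message, files, false)
    else if PySem.Str.startswith line "timestamp: " then
      (parent, PySem.Str.slice line (some (PySem.Str.len "timestamp: ")) none, message, files, false)
    else if PySem.Str.startswith line "message: " then
      (parent, timestamp, PySem.Str.slice line (some (PySem.Str.len "message: ")) none, files, false)
    else if line = "files:" then
      (parent, timestamp, message, files, true)
    else (parent, timestamp, message, files, false)

def parse_commit (content : String) : String × String × String × (List (String × String)) :=
  let lines := (PySem.Str.split? content "\n").getD []
  let r := lines.foldl pcStepA ("", "", "", [], false)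
  (r.1, r.2.1, r.2.2.1, r.2.2.2.1)

-- ===== PORT B =====
def pcLastWith (pre : String) : List String → String
  | [] => ""
  | l :: rest =>
    if PySem.Str.startswith l pre then PySem.Str.slice l (some (PySem.Str.len pre)) none
    else pcLastWith pre rest

def pcAddFile (acc : List (String × String)) (line : String) : List (String × String) :=
  match (PySem.Str.splitMax? (PySem.Str.strip line) " " 1).getD [] with
  | [a, b] => acc ++ [(a, b)]
  | _ => acc

def parse_commit_alt (content : String) : String × String × String × (List (String × String)) :=
  let lines := (PySem.Str.split? content "\n").getD []
  let cut := (PySem.List.index? lines "files:").getD lines.length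
  let header := lines.take cut
  (pcLastWith "parent: " header.reverse,
   pcLastWith "timestamp: " header.reverse,
   pcLastWith "message: " header.reverse,
   (lines.drop (cut + 1)).foldl pcAddFile [])

-- ===== PRECONDITION & SPEC =====
def Spec_parse_commit (content : String) (out : String × String × String × (List (String × String))) : Prop := out = parse_commit_alt content
instance (content : String) (out : String × String × String × (List (String × String))) : Decidable (Spec_parse_commit content out) := by unfold Spec_parse_commit; infer_instance

-- ===== CLAIM (what is proved, stated in full; the proofs are below) =====
def Claim_equal_parse_commit : Prop := ∀ (content : String), Dom_parse_commit content → Spec_parse_commit content (parse_commit content)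

-- ===== LEMMAS AND PROOFS =====

-- last-wins header fold (proof-side characterisation of pcLastWith on the reversed header)
def pcHdrStep (pre : String) (acc : String) (l : String) : String :=
  if PySem.Str.startswith l pre then PySem.Str.slice l (some (PySem.Str.len pre)) none else acc

def pcHdrV (pre : String) (d : String) (ls : List String) : String :=
  ls.foldl (pcHdrStep pre) d

theorem pcLastWith_reverse (pre : String) (ls : List String) :
    pcLastWith pre ls.reverse = pcHdrV pre "" ls := by
  induction ls using List.reverseRecOn with
  | nil => rfl
  | append_singleton ls x ih =>
    simp only [List.reverse_append, List.reverse_cons, List.reverse_nil, List.nil_append,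
      List.cons_append, pcLastWith, pcHdrV, List.foldl_append, List.foldl_cons, List.foldl_nil]
    by_cases h : PySem.Chars.startswith x.toList pre.toList
    · simp [h, pcHdrStep]
    · simp [h, pcHdrStep, ih, pcHdrV]

theorem pcAddFile_shift (acc : List (String × String)) (l : String) :
    pcAddFile acc l = acc ++ pcAddFile [] l := by
  unfold pcAddFile
  generalize (PySem.Str.splitMax? (PySem.Str.strip l) " " 1).getD [] = xs
  match xs with
  | [] => simp
  | [a] => simp
  | [a, b] => simp
  | a :: b :: c :: t => simp

theorem foldl_pcAddFile_shift (ls : List String) (acc : List (String × String)) :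
    ls.foldl pcAddFile acc = acc ++ ls.foldl pcAddFile [] := by
  induction ls generalizing acc with
  | nil => simp
  | cons l ls ih =>
    simp only [List.foldl_cons]
    rw [pcAddFile_shift, ih, ih (pcAddFile [] l), List.append_assoc]

theorem pcStepA_true (p t m : String) (fs : List (String × String)) (l : String) :
    pcStepA (p, t, m, fs, true) l = (p, t, m, pcAddFile fs l, true) := by
  unfold pcStepA pcAddFile
  by_cases h : PySem.Str.strip l = ""
  · simp only [h, if_true]
    have : (PySem.Str.splitMax? "" " " 1).getD [] = [""] := by decide
    simp [this]
  · simp only [if_true, if_neg h]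
    generalize (PySem.Str.splitMax? (PySem.Str.strip l) " " 1).getD [] = xs
    match xs with
    | [] => rfl
    | [a] => rfl
    | [a, b] => rfl
    | a :: b :: c :: t => rfl

-- phase 2 of A's loop: once in_files is set, the loop only accumulates files
theorem pcFoldA_true (ls : List String) (p t m : String) (fs : List (String × String)) :
    ls.foldl pcStepA (p, t, m, fs, true) = (p, t, m, ls.foldl pcAddFile fs, true) := by
  induction ls generalizing fs with
  | nil => rfl
  | cons l ls ih => simp only [List.foldl_cons, pcStepA_true, ih]

-- two distinct-headed char lists cannot both be prefixes of the same line
theorem pc_excl (a b : Char) (s t u : List Char) (hab : a ≠ b)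
    (h : PySem.Chars.startswith u (a :: s) = true) :
    PySem.Chars.startswith u (b :: t) = false := by
  rw [← Bool.not_eq_true]
  intro hq
  rw [PySem.Chars.startswith_iff] at h hq
  obtain ⟨x, hx⟩ := h
  obtain ⟨y, hy⟩ := hq
  rw [← hx] at hy
  simp only [List.cons_append] at hy
  injection hy with h1 _
  exact hab h1.symm

-- phase 1: A's fold from a header state equals B's split-index reading
theorem pcFoldA_false (ls : List String) (p t m : String) (fs : List (String × String)) :
    ls.foldl pcStepA (p, t, m, fs, false) =
      (pcHdrV "parent: " p (ls.take ((PySem.List.index? ls "files:").getD ls.length)),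
       pcHdrV "timestamp: " t (ls.take ((PySem.List.index? ls "files:").getD ls.length)),
       pcHdrV "message: " m (ls.take ((PySem.List.index? ls "files:").getD ls.length)),
       fs ++ (ls.drop ((PySem.List.index? ls "files:").getD ls.length + 1)).foldl pcAddFile [],
       decide ("files:" ∈ ls)) := by
  induction ls generalizing p t m fs with
  | nil => simp [pcHdrV]
  | cons l rest ih =>
    rw [List.foldl_cons]
    by_cases hl : l = "files:"
    · subst hl
      have hstep : pcStepA (p, t, m, fs, false) "files:" = (p, t, m, fs, true) := by
        simp only [pcStepA]
        simp only [Bool.false_eq_true, if_false]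
        split_ifs with h1 h2 h3
        · exact absurd h1 (by decide)
        · exact absurd h2 (by decide)
        · exact absurd h3 (by decide)
        · rfl
      rw [hstep, pcFoldA_true, foldl_pcAddFile_shift]
      rw [PySem.List.index?_cons_self]
      simp [pcHdrV]
    · have hcut : (PySem.List.index? (l :: rest) "files:").getD (l :: rest).length
          = (PySem.List.index? rest "files:").getD rest.length + 1 := by
        rw [PySem.List.index?_cons_of_ne rest hl]
        simp
      have hl2 : "files:" ≠ l := fun h => hl h.symm
      have hmem : decide ("files:" ∈ l :: rest) = decide ("files:" ∈ rest) := by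
        simp [List.mem_cons, hl2]
      rw [hcut, hmem, List.take_succ_cons, List.drop_succ_cons]
      by_cases hp : PySem.Chars.startswith l.toList ['p', 'a', 'r', 'e', 'n', 't', ':', ' '] = true
      · have ht := pc_excl 'p' 't' ['a', 'r', 'e', 'n', 't', ':', ' '] ['i', 'm', 'e', 's', 't', 'a', 'm', 'p', ':', ' '] l.toList (by decide) hp
        have hm := pc_excl 'p' 'm' ['a', 'r', 'e', 'n', 't', ':', ' '] ['e', 's', 's', 'a', 'g', 'e', ':', ' '] l.toList (by decide) hp
        have hstep : pcStepA (p, t, m, fs, false) l =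
            (PySem.Str.slice l (some (PySem.Str.len "parent: ")) none, t, m, fs, false) := by
          simp [pcStepA, hp]
        rw [hstep, ih]
        simp [pcHdrV, pcHdrStep, hp, ht, hm]
      · by_cases ht : PySem.Chars.startswith l.toList ['t', 'i', 'm', 'e', 's', 't', 'a', 'm', 'p', ':', ' '] = true
        · have hm := pc_excl 't' 'm' ['i', 'm', 'e', 's', 't', 'a', 'm', 'p', ':', ' '] ['e', 's', 's', 'a', 'g', 'e', ':', ' '] l.toList (by decide) ht
          have hstep : pcStepA (p, t, m, fs, false) l =
              (p, PySem.Str.slice l (some (PySem.Str.len "timestamp: ")) none, m, fs, false) := by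
            simp [pcStepA, hp, ht]
          rw [hstep, ih]
          simp [pcHdrV, pcHdrStep, hp, ht, hm]
        · by_cases hm : PySem.Chars.startswith l.toList ['m', 'e', 's', 's', 'a', 'g', 'e', ':', ' '] = true
          · have hstep : pcStepA (p, t, m, fs, false) l =
                (p, t, PySem.Str.slice l (some (PySem.Str.len "message: ")) none, fs, false) := by
              simp [pcStepA, hp, ht, hm]
            rw [hstep, ih]
            simp [pcHdrV, pcHdrStep, hp, ht, hm]
          · have hstep : pcStepA (p, t, m, fs, false) l = (p, t, m, fs, false) := by
              simp [pcStepA, hp, ht, hm, hl]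
            rw [hstep, ih]
            simp [pcHdrV, pcHdrStep, hp, ht, hm]

-- ===== VERDICT (by name: the statement is the Claim_ definition above) =====
theorem parse_commit_spec : Claim_equal_parse_commit := by
  intro content _
  unfold Spec_parse_commit parse_commit parse_commit_alt
  simp only []
  generalize (PySem.Str.split? content "\n").getD [] = lines
  rw [pcFoldA_false]
  simp [pcLastWith_reverse]
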